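-- pv_equiv track=rewrite | github.com/pete-RK/LeetCode | array/smallest-subarray-to-sort-in-every-sliding-window.py | minSubarraySort
-- ===== SOURCE A (Python) =====
-- from typing import List
--
-- def minSubarraySort(nums: List[int], k: int) -> List[int]:
--
--     def find_boundaries(arr):
--         max_seen = arr[0]
--         right_boundary = -1
--         for i in range(1, len(arr)):
--             if arr[i] < max_seen:
--                 right_boundary = i
--             max_seen = max(max_seen, arr[i])
--
--         min_seen = arr[-1]
--         left_boundary = len(arr)
--         for i in range(len(arr) - 2, -1, -1):
--             if arr[i] > min_seen:
--                 left_boundary = i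
--             min_seen = min(min_seen, arr[i])
--
--         if right_boundary >= left_boundary:
--             return right_boundary - left_boundary + 1
--         return 0
--
--     res = []
--     for i in range(len(nums) - k + 1):
--         curr = nums[i:i+k]
--         res.append(find_boundaries(curr))
--
--     return res
-- ===== SOURCE B (Python) =====
-- from typing import List
--
-- def minSubarraySort(nums: List[int], k: int) -> List[int]:
--     # For each window, an index j is a "right" mismatch if some earlier element
--     # exceeds w[j], and a "left" mismatch if some later element is below w[j];
--     # the answer is last right mismatch - first left mismatch + 1 (0 if none).
--     res = []
--     for i in range(len(nums) - k + 1):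
--         w = nums[i:i+k]
--         rights = [j for j in range(k) if any(w[p] > w[j] for p in range(j))]
--         lefts = [j for j in range(k) if any(w[q] < w[j] for q in range(j + 1, k))]
--         res.append(rights[-1] - lefts[0] + 1 if rights else 0)
--     return res
-- ===== Notes on version B (the rewrite author's own statement) =====
-- stated objective: alternative
-- what changed: Per window, the two directional prefix-max/suffix-min scans with running state are replaced by direct comprehensions collecting every out-of-place index (an earlier larger element / a later smaller element) and taking the last and first of them.
import Mathlib
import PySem

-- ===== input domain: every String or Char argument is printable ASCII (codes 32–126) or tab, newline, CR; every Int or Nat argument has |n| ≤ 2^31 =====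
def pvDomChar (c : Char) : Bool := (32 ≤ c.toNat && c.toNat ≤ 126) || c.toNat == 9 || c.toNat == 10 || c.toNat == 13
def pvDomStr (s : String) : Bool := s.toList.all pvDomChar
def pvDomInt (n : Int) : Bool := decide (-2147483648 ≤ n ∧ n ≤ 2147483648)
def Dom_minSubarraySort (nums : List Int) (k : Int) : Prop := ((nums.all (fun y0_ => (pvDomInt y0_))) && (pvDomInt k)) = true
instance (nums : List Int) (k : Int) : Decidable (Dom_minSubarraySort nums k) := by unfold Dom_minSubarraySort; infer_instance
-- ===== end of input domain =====

-- B replaces A's two directional running-state scans per window by comprehensions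
-- collecting every out-of-place index; objective: alternative (not faster).

-- ===== PORT A =====
-- forward-loop body of find_boundaries: state (max_seen, right_boundary)
def stepF (arr : List Int) (st : Int × Int) (i : Int) : Int × Int :=
  let x := PySem.List.pyGetD arr i 0
  (max st.1 x, if x < st.1 then i else st.2)

-- backward-loop body of find_boundaries: state (min_seen, left_boundary)
def stepB (arr : List Int) (st : Int × Int) (i : Int) : Int × Int :=
  let x := PySem.List.pyGetD arr i 0
  (min st.1 x, if x > st.1 then i else st.2)

-- find_boundaries(arr); arr[0]/arr[-1] ported with default 0 (Pre_ keeps windows nonempty)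
def fbA (arr : List Int) : Int :=
  let fwd := (PySem.List.pyRange 1 (arr.length : Int) 1).foldl (stepF arr)
    (PySem.List.pyGetD arr 0 0, -1)
  let bwd := (PySem.List.pyRange ((arr.length : Int) - 2) (-1) (-1)).foldl (stepB arr)
    (PySem.List.pyGetD arr (-1) 0, (arr.length : Int))
  if fwd.2 ≥ bwd.2 then fwd.2 - bwd.2 + 1 else 0

def minSubarraySort (nums : List Int) (k : Int) : List Int :=
  (PySem.List.pyRange 0 ((nums.length : Int) - k + 1) 1).foldl
    (fun res i => res ++ [fbA (PySem.List.slice nums (some i) (some (i + k)))]) []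

-- ===== PORT B =====
-- per-window computation of B: rights/lefts comprehensions, then rights[-1] - lefts[0] + 1
def fbB (w : List Int) (k : Int) : Int :=
  let rights := (PySem.List.pyRange 0 k 1).filter (fun j =>
      (PySem.List.pyRange 0 j 1).any (fun p =>
        PySem.List.pyGetD w j 0 < PySem.List.pyGetD w p 0))
  let lefts := (PySem.List.pyRange 0 k 1).filter (fun j =>
      (PySem.List.pyRange (j + 1) k 1).any (fun q =>
        PySem.List.pyGetD w q 0 < PySem.List.pyGetD w j 0))
  if rights ≠ [] then
    PySem.List.pyGetD rights (-1) 0 - PySem.List.pyGetD lefts 0 0 + 1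
  else 0

def minSubarraySort_alt (nums : List Int) (k : Int) : List Int :=
  (PySem.List.pyRange 0 ((nums.length : Int) - k + 1) 1).foldl
    (fun res i => res ++ [fbB (PySem.List.slice nums (some i) (some (i + k))) k]) []

-- ===== PRECONDITION & SPEC =====
-- A indexes arr[0]/arr[-1] of each window nums[i:i+k]; for k < 1 the first window is
-- empty and A raises IndexError, so Pre_ requires k ≥ 1 (exactly where A returns).
def Pre_minSubarraySort (nums : List Int) (k : Int) : Prop := 1 ≤ k
instance (nums : List Int) (k : Int) : Decidable (Pre_minSubarraySort nums k) := by
  unfold Pre_minSubarraySort; infer_instance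

def pvWitness_minSubarraySort : List Int × Int := ([1, 3, 2, 2, 4], 3)

def Spec_minSubarraySort (nums : List Int) (k : Int) (out : List Int) : Prop :=
  out = minSubarraySort_alt nums k
instance (nums : List Int) (k : Int) (out : List Int) : Decidable (Spec_minSubarraySort nums k out) := by
  unfold Spec_minSubarraySort; infer_instance

-- ===== CLAIM (what is proved, stated in full; the proofs are below) =====
def Claim_equal_minSubarraySort : Prop := ∀ (nums : List Int) (k : Int),
  Dom_minSubarraySort nums k → Pre_minSubarraySort nums k →
  Spec_minSubarraySort nums k (minSubarraySort nums k)

-- ===== LEMMAS AND PROOFS =====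

-- w[j] as an Int-valued function of a Nat index
def ga (w : List Int) (j : Nat) : Int := w.getD j 0

-- index j has an earlier, larger element (Bool and Prop forms)
def bR (w : List Int) (j : Nat) : Bool :=
  (List.range j).any (fun p => decide (ga w j < ga w p))
def badR (w : List Int) (j : Nat) : Prop := ∃ p, p < j ∧ ga w j < ga w p

-- index j has a later, smaller element (within length n)
def bL (w : List Int) (n j : Nat) : Bool :=
  (List.range (n - (j + 1))).any (fun t => decide (ga w (j + 1 + t) < ga w j))
def badL (w : List Int) (j : Nat) : Prop := ∃ q, j < q ∧ q < w.length ∧ ga w q < ga w j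

lemma bR_iff (w : List Int) (j : Nat) : bR w j = true ↔ badR w j := by
  simp [bR, badR, List.any_eq_true, List.mem_range]

lemma bL_iff (w : List Int) (j : Nat) : bL w w.length j = true ↔ badL w j := by
  simp [bL, badL, List.any_eq_true, List.mem_range]
  constructor
  · rintro ⟨t, ht, h⟩; exact ⟨j + 1 + t, by omega, by omega, h⟩
  · rintro ⟨q, h1, h2, h⟩; exact ⟨q - (j + 1), by omega, by
      have : j + 1 + (q - (j + 1)) = q := by omega
      rw [this]; exact h⟩

-- invariant of A's forward loop after scanning indices [1, m)
def InvF (w : List Int) (m : Nat) (st : Int × Int) : Prop :=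
  (∀ p < m, ga w p ≤ st.1) ∧ (∃ p < m, st.1 = ga w p) ∧
  ((st.2 = -1 ∧ ∀ j < m, ¬ badR w j) ∨
   (∃ jn : Nat, st.2 = (jn : Int) ∧ jn < m ∧ badR w jn ∧ ∀ j, jn < j → j < m → ¬ badR w j))

-- invariant of A's backward loop with indices [s, n) still giving the suffix state
def InvB (w : List Int) (s : Nat) (st : Int × Int) : Prop :=
  (∀ q, s ≤ q → q < w.length → st.1 ≤ ga w q) ∧
  (∃ q, s ≤ q ∧ q < w.length ∧ st.1 = ga w q) ∧
  ((st.2 = (w.length : Int) ∧ ∀ j, s ≤ j → j < w.length → ¬ badL w j) ∨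
   (∃ jn : Nat, st.2 = (jn : Int) ∧ s ≤ jn ∧ jn < w.length ∧ badL w jn ∧
      ∀ j, s ≤ j → j < jn → ¬ badL w j))

lemma stepF_inv (w : List Int) (m : Nat) (st : Int × Int)
    (hm : m < w.length) (h : InvF w m st) : InvF w (m + 1) (stepF w st (m : Int)) := by
  obtain ⟨h1, ⟨p0, hp0, hps⟩, h3⟩ := h
  have hx : PySem.List.pyGetD w (m : Int) 0 = ga w m := by
    simp [PySem.List.pyGetD_natCast, ga]
  have hcond : (PySem.List.pyGetD w (m : Int) 0 < st.1) ↔ badR w m := by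
    rw [hx]
    constructor
    · intro hlt; exact ⟨p0, hp0, by rw [← hps]; exact hlt⟩
    · rintro ⟨p, hp, hlt⟩; exact lt_of_lt_of_le hlt (h1 p hp)
  refine ⟨?_, ?_, ?_⟩
  · intro p hp
    simp only [stepF, hx]
    rcases Nat.lt_succ_iff_lt_or_eq.mp hp with h | h
    · exact le_trans (h1 p h) (le_max_left _ _)
    · subst h; exact le_max_right _ _
  · simp only [stepF, hx]
    rcases le_total st.1 (ga w m) with hle | hle
    · exact ⟨m, by omega, by simp [max_eq_right hle]⟩
    · exact ⟨p0, by omega, by rw [max_eq_left hle]; exact hps⟩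
  · by_cases hc : PySem.List.pyGetD w (m : Int) 0 < st.1
    · right
      refine ⟨m, by simp only [stepF]; rw [if_pos hc], by omega, hcond.mp hc, ?_⟩
      intro j h1' h2'; omega
    · have hnb : ¬ badR w m := fun hb => hc (hcond.mpr hb)
      rcases h3 with ⟨he, hall⟩ | ⟨jn, he, hlt, hb, hmax⟩
      · left
        refine ⟨by simp only [stepF]; rw [if_neg hc]; exact he, ?_⟩
        intro j hj
        rcases Nat.lt_succ_iff_lt_or_eq.mp hj with h | h
        · exact hall j h
        · subst h; exact hnb
      · right
        refine ⟨jn, by simp only [stepF]; rw [if_neg hc]; exact he, by omega, hb, ?_⟩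
        intro j hj1 hj2
        rcases Nat.lt_succ_iff_lt_or_eq.mp hj2 with h | h
        · exact hmax j hj1 h
        · subst h; exact hnb

lemma fwd_inv (w : List Int) : ∀ m, 1 ≤ m → m ≤ w.length →
    InvF w m ((PySem.List.pyRange 1 (m : Int) 1).foldl (stepF w)
      (PySem.List.pyGetD w 0 0, -1)) := by
  intro m
  induction m with
  | zero => intro h1 _; omega
  | succ m ih =>
    intro h1 h2
    by_cases hm : m = 0
    · subst hm
      rw [show (((0 : Nat) + 1 : Nat) : Int) = 1 by norm_num,
        PySem.List.pyRange_one_eq_nil (le_refl 1)]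
      simp only [List.foldl_nil]
      have hz : PySem.List.pyGetD w 0 0 = ga w 0 := by
        simp [PySem.List.pyGetD_zero, ga]
      refine ⟨?_, ⟨0, by omega, hz⟩, Or.inl ⟨rfl, ?_⟩⟩
      · intro p hp
        have : p = 0 := by omega
        subst this; exact le_of_eq hz.symm
      · intro j hj
        have : j = 0 := by omega
        subst this
        rintro ⟨p, hp, _⟩; omega
    · have hm1 : (1 : Int) ≤ (m : Int) := by exact_mod_cast Nat.one_le_iff_ne_zero.mpr hm
      have hcast : ((m + 1 : Nat) : Int) = (m : Int) + 1 := by push_cast; ring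
      rw [hcast, PySem.List.pyRange_one_succ_right hm1, List.foldl_append]
      simp only [List.foldl_cons, List.foldl_nil]
      exact stepF_inv w m _ (by omega) (ih (by omega) (by omega))

lemma stepB_inv (w : List Int) (s : Nat) (st : Int × Int)
    (hs : s < w.length) (h : InvB w (s + 1) st) : InvB w s (stepB w st (s : Int)) := by
  obtain ⟨h1, ⟨q0, hq0a, hq0b, hqs⟩, h3⟩ := h
  have hx : PySem.List.pyGetD w (s : Int) 0 = ga w s := by
    simp [PySem.List.pyGetD_natCast, ga]
  have hcond : (PySem.List.pyGetD w (s : Int) 0 > st.1) ↔ badL w s := by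
    rw [hx]
    constructor
    · intro hlt; exact ⟨q0, by omega, hq0b, by rw [← hqs]; exact hlt⟩
    · rintro ⟨q, hq1, hq2, hlt⟩
      exact lt_of_le_of_lt (h1 q (by omega) hq2) hlt
  refine ⟨?_, ?_, ?_⟩
  · intro q hq1 hq2
    simp only [stepB, hx]
    rcases Nat.eq_or_lt_of_le hq1 with h | h
    · subst h; exact min_le_right _ _
    · exact le_trans (min_le_left _ _) (h1 q (by omega) hq2)
  · simp only [stepB, hx]
    rcases le_total st.1 (ga w s) with hle | hle
    · exact ⟨q0, by omega, hq0b, by rw [min_eq_left hle]; exact hqs⟩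
    · exact ⟨s, by omega, hs, by simp [min_eq_right hle]⟩
  · by_cases hc : PySem.List.pyGetD w (s : Int) 0 > st.1
    · right
      refine ⟨s, by simp only [stepB]; rw [if_pos hc], by omega, hs, hcond.mp hc, ?_⟩
      intro j hj1 hj2; omega
    · have hnb : ¬ badL w s := fun hb => hc (hcond.mpr hb)
      rcases h3 with ⟨he, hall⟩ | ⟨jn, he, hjn1, hjn2, hb, hmin⟩
      · left
        refine ⟨by simp only [stepB]; rw [if_neg hc]; exact he, ?_⟩
        intro j hj1 hj2
        rcases Nat.eq_or_lt_of_le hj1 with h | h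
        · subst h; exact hnb
        · exact hall j (by omega) hj2
      · right
        refine ⟨jn, by simp only [stepB]; rw [if_neg hc]; exact he, by omega, hjn2, hb, ?_⟩
        intro j hj1 hj2
        rcases Nat.eq_or_lt_of_le hj1 with h | h
        · subst h; exact hnb
        · exact hmin j (by omega) hj2

lemma bwd_inv (w : List Int) : ∀ (s : Nat) (st : Int × Int), s + 1 ≤ w.length →
    InvB w (s + 1) st →
    InvB w 0 ((PySem.List.pyRange (s : Int) (-1) (-1)).foldl (stepB w) st) := by
  intro s
  induction s with
  | zero =>
    intro st h1 h2
    rw [show (((0 : Nat)) : Int) = 0 by norm_num,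
      PySem.List.pyRange_neg_one_cons (by norm_num : (-1 : Int) < 0)]
    rw [show (0 - 1 : Int) = -1 by norm_num, PySem.List.pyRange_neg_one_eq_nil (le_refl (-1))]
    simp only [List.foldl_cons, List.foldl_nil]
    have := stepB_inv w 0 st (by omega) h2
    simpa using this
  | succ s ih =>
    intro st h1 h2
    have hlt : (-1 : Int) < ((s + 1 : Nat) : Int) := by omega
    rw [PySem.List.pyRange_neg_one_cons hlt, List.foldl_cons]
    have hcast : ((s + 1 : Nat) : Int) - 1 = (s : Int) := by push_cast; ring
    rw [hcast]
    exact ih (stepB w st ((s + 1 : Nat) : Int)) (by omega)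
      (stepB_inv w (s + 1) st (by omega) h2)

lemma filter_range_getLast (p : Nat → Bool) (n j : Nat) (hj : j < n) (hp : p j = true)
    (hlast : ∀ i, j < i → i < n → p i = false) :
    ((List.range n).filter p).getLast? = some j := by
  have hn : n = (j + 1) + (n - (j + 1)) := by omega
  rw [hn, List.range_add, List.filter_append]
  have h2 : (((List.range (n - (j + 1))).map (fun t => (j + 1) + t)).filter p) = [] := by
    rw [List.filter_eq_nil_iff]
    intro x hx
    simp only [List.mem_map, List.mem_range] at hx
    obtain ⟨t, ht, rfl⟩ := hx
    simp [hlast ((j + 1) + t) (by omega) (by omega)]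
  rw [h2, List.append_nil, List.range_succ, List.filter_append]
  have h3 : List.filter p [j] = [j] := by simp [hp]
  rw [h3, List.getLast?_concat]

lemma filter_range_head (p : Nat → Bool) (n j : Nat) (hj : j < n) (hp : p j = true)
    (hfirst : ∀ i, i < j → p i = false) :
    ((List.range n).filter p).head? = some j := by
  have hn : n = j + (n - j) := by omega
  rw [hn, List.range_add, List.filter_append]
  have h1 : (List.range j).filter p = [] := by
    rw [List.filter_eq_nil_iff]
    intro x hx
    simp only [List.mem_range] at hx
    simp [hfirst x hx]
  rw [h1, List.nil_append]
  have h2 : n - j = (n - j - 1) + 1 := by omega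
  rw [h2, List.range_succ_eq_map, List.map_cons, List.filter_cons]
  simp [hp]

lemma rights_eq (w : List Int) :
    ((PySem.List.pyRange 0 (w.length : Int) 1).filter (fun j =>
        (PySem.List.pyRange 0 j 1).any (fun p =>
          PySem.List.pyGetD w j 0 < PySem.List.pyGetD w p 0))) =
    ((List.range w.length).filter (bR w)).map (fun j : Nat => (j : Int)) := by
  rw [PySem.List.pyRange_zero_natCast, List.filter_map]
  refine congrArg (List.map (fun j : Nat => (j : Int))) ?_
  apply List.filter_congr
  intro j hj
  simp only [Function.comp_apply]
  rw [PySem.List.pyRange_zero_natCast, List.any_map]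
  simp only [bR]
  congr 1
  funext p
  simp [ga, PySem.List.pyGetD_natCast]

lemma lefts_eq (w : List Int) :
    ((PySem.List.pyRange 0 (w.length : Int) 1).filter (fun j =>
        (PySem.List.pyRange (j + 1) (w.length : Int) 1).any (fun q =>
          PySem.List.pyGetD w q 0 < PySem.List.pyGetD w j 0))) =
    ((List.range w.length).filter (bL w w.length)).map (fun j : Nat => (j : Int)) := by
  rw [PySem.List.pyRange_zero_natCast, List.filter_map]
  refine congrArg (List.map (fun j : Nat => (j : Int))) ?_
  apply List.filter_congr
  intro j hj
  simp only [Function.comp_apply]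
  rw [show ((j : Int) + 1) = ((j + 1 : Nat) : Int) by push_cast; ring,
    PySem.List.pyRange_one, List.any_map]
  have harg : ((w.length : Int) - ((j + 1 : Nat) : Int)).toNat = w.length - (j + 1) := by omega
  rw [harg]
  simp only [bL]
  congr 1
  funext t
  simp only [Function.comp_apply]
  have hc : ((j + 1 : Nat) : Int) + (t : Int) = ((j + 1 + t : Nat) : Int) := by push_cast; ring
  rw [hc]
  simp only [ga, PySem.List.pyGetD_natCast]
  rfl

-- the central per-window equality
lemma no_badL_of_no_badR (w : List Int) (hex : ¬ ∃ j, j < w.length ∧ badR w j) :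
    ∀ j, ¬ badL w j := by
  rintro j ⟨q, hq1, hq2, hlt⟩
  exact hex ⟨q, hq2, j, hq1, hlt⟩

lemma fb_eq (w : List Int) (hw : w ≠ []) : fbA w = fbB w (w.length : Int) := by
  have hn1 : 1 ≤ w.length := List.length_pos_of_ne_nil hw
  -- the initial state of the backward loop satisfies the invariant at s = n - 1
  have hlastw : PySem.List.pyGetD w (-1) 0 = ga w (w.length - 1) := by
    rw [PySem.List.pyGetD_neg_one w 0 hw, List.getLast_eq_getElem, ga,
      List.getD_eq_getElem w 0 (by omega)]
  have hinit : InvB w (w.length - 1) (PySem.List.pyGetD w (-1) 0, (w.length : Int)) := by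
    refine ⟨?_, ⟨w.length - 1, by omega, by omega, hlastw⟩, Or.inl ⟨rfl, ?_⟩⟩
    · intro q hq1 hq2
      have : q = w.length - 1 := by omega
      subst this; exact le_of_eq hlastw
    · rintro j hj1 hj2 ⟨q, h1, h2, _⟩; omega
  have hF := fwd_inv w w.length hn1 le_rfl
  have hB : InvB w 0 ((PySem.List.pyRange ((w.length : Int) - 2) (-1) (-1)).foldl (stepB w)
      (PySem.List.pyGetD w (-1) 0, (w.length : Int))) := by
    by_cases h2 : w.length = 1
    · rw [h2] at hinit ⊢
      rw [show ((1 : Nat) : Int) - 2 = -1 by norm_num,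
        PySem.List.pyRange_neg_one_eq_nil (le_refl (-1))]
      simpa using hinit
    · have hc : ((w.length : Int) - 2) = ((w.length - 2 : Nat) : Int) := by omega
      rw [hc]
      refine bwd_inv w (w.length - 2) _ (by omega) ?_
      have : w.length - 2 + 1 = w.length - 1 := by omega
      rw [this]
      exact hinit
  simp only [fbA, fbB, rights_eq, lefts_eq]
  by_cases hex : ∃ j, j < w.length ∧ badR w j
  · -- some index is out of place
    obtain ⟨hF1, hF2, hF3⟩ := hF
    rcases hF3 with ⟨_, hall⟩ | ⟨jmax, heF, hjmax, hbmax, hmax⟩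
    · obtain ⟨j, hj, hb⟩ := hex; exact absurd hb (hall j hj)
    obtain ⟨p1, hp1, hlt1⟩ := hbmax
    have hbLp1 : badL w p1 := ⟨jmax, hp1, hjmax, hlt1⟩
    obtain ⟨hB1, hB2, hB3⟩ := hB
    rcases hB3 with ⟨_, hall⟩ | ⟨jmin, heB, _, hjmin2, hbmin, hmin⟩
    · exact absurd hbLp1 (hall p1 (by omega) (by omega))
    have hminle : jmin ≤ p1 := by
      by_contra hcon
      exact absurd hbLp1 (hmin p1 (by omega) (by omega))
    -- characterize rights and lefts
    have hrlast : (((List.range w.length).filter (bR w)).map (fun j : Nat => (j : Int))).getLast?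
        = some (jmax : Int) := by
      rw [List.getLast?_map, filter_range_getLast (bR w) w.length jmax hjmax
        ((bR_iff w jmax).mpr ⟨p1, hp1, hlt1⟩)
        (fun i h1 h2 => by
          rw [← Bool.not_eq_true, bR_iff]; exact hmax i h1 h2)]
      rfl
    have hlhead : (((List.range w.length).filter (bL w w.length)).map (fun j : Nat => (j : Int))).head?
        = some (jmin : Int) := by
      rw [List.head?_map, filter_range_head (bL w w.length) w.length jmin hjmin2
        ((bL_iff w jmin).mpr hbmin)
        (fun i h1 => by
          rw [← Bool.not_eq_true, bL_iff]; exact hmin i (by omega) h1)]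
      rfl
    have hrne : (((List.range w.length).filter (bR w)).map (fun j : Nat => (j : Int))) ≠ [] := by
      intro hnil; rw [hnil] at hrlast; simp at hrlast
    have hrval : PySem.List.pyGetD
        (((List.range w.length).filter (bR w)).map (fun j : Nat => (j : Int))) (-1) 0
        = (jmax : Int) := by
      rw [PySem.List.pyGetD_neg_one _ 0 hrne]
      have h1 := List.getLast?_eq_some_getLast (l :=
        ((List.range w.length).filter (bR w)).map (fun j : Nat => (j : Int))) hrne
      rw [h1] at hrlast
      exact Option.some.inj hrlast
    have hlval : PySem.List.pyGetD
        (((List.range w.length).filter (bL w w.length)).map (fun j : Nat => (j : Int))) 0 0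
        = (jmin : Int) := by
      obtain ⟨t, ht⟩ := List.head?_eq_some_iff.mp hlhead
      rw [PySem.List.pyGetD_zero, ht, List.getD_cons_zero]
    rw [heF, heB, hrval, hlval]
    rw [if_pos (show (jmax : Int) ≥ (jmin : Int) by exact_mod_cast Nat.le_of_lt (Nat.lt_of_le_of_lt hminle hp1))]
    rw [if_pos hrne]
  · -- the window is already sorted: both return 0
    obtain ⟨_, _, hF3⟩ := hF
    rcases hF3 with ⟨heF, _⟩ | ⟨jn, _, hjn, hb, _⟩
    · obtain ⟨_, _, hB3⟩ := hB
      rcases hB3 with ⟨heB, _⟩ | ⟨jn, _, _, hjn2, hb, _⟩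
      · have hrnil : ((List.range w.length).filter (bR w)).map (fun j : Nat => (j : Int)) = [] := by
          rw [List.filter_eq_nil_iff.mpr ?_, List.map_nil]
          intro j hj
          rw [bR_iff]
          exact fun hbr => hex ⟨j, List.mem_range.mp hj, hbr⟩
        rw [heF, heB, hrnil]
        rw [if_neg (show ¬ ((-1 : Int) ≥ (w.length : Int)) by omega)]
        simp
      · exact absurd hb (no_badL_of_no_badR w hex jn)
    · exact absurd hb (fun h => hex ⟨jn, hjn, h⟩)

-- ===== VERDICT (by name: the statement is the Claim_ definition above) =====
theorem minSubarraySort_spec : Claim_equal_minSubarraySort := by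
  intro nums k _ hpre
  have hk1 : (1 : Int) ≤ k := hpre
  unfold Spec_minSubarraySort minSubarraySort minSubarraySort_alt
  rw [PySem.List.foldl_append_singleton_eq_map, PySem.List.foldl_append_singleton_eq_map,
    List.nil_append, List.nil_append]
  apply List.map_congr_left
  intro i hi
  rw [PySem.List.mem_pyRange_one] at hi
  obtain ⟨hi0, hi1⟩ := hi
  have hik : i + k ≤ (nums.length : Int) := by omega
  have hlen : (PySem.List.slice nums (some i) (some (i + k))).length = k.toNat := by
    rw [PySem.List.slice_toNat _ hi0 (by omega), List.length_take, List.length_drop]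
    omega
  have hne : PySem.List.slice nums (some i) (some (i + k)) ≠ [] := by
    intro h
    rw [h] at hlen
    simp at hlen
    omega
  have hcast : ((PySem.List.slice nums (some i) (some (i + k))).length : Int) = k := by
    rw [hlen]; omega
  rw [fb_eq _ hne, hcast]
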